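-- pv_equiv track=rewrite | github.com/WuYudaPKU/CS101_PekingUniversity | OJ_and_CF/OJ_Yogurt_factory.py | min_cost
-- ===== SOURCE A (Python) =====
-- def min_cost(n,s,arr):
--     min_cost = arr[0][0] * arr[0][1]  #最小花销 = 第一周成本*第一周需求量
--     min_price = arr[0][0] #假设第一周成本是最小成本
--     for i in range(1,n):
--         min_price = min(min_price+s,arr[i][0]) #第i周的最小成本是上周成本或者现在的成本
--         cost = min_price * arr[i][1] #第i周的最小花费是
--         min_cost+= cost
--     return min_cost
-- ===== SOURCE B (Python) =====
-- def min_cost(n, s, arr):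
--     # Shift trick: effective price p_i = min_{j<=i}(c_j + (i-j)*s) = (min_{j<=i}(c_j - j*s)) + i*s,
--     # so a running minimum of the s-shifted prices replaces the coupled min(prev+s, c_i) recurrence.
--     mins = [arr[0][0]]
--     for i in range(1, n):
--         mins.append(min(mins[-1], arr[i][0] - i * s))
--     total = 0
--     for i, m in enumerate(mins):
--         total += (m + i * s) * arr[i][1]
--     return total
-- ===== Notes on version B (the rewrite author's own statement) =====
-- stated objective: alternative
-- what changed: B replaces A's coupled recurrence min(prev_price+s, c_i) by the linear shift trick: it keeps a running minimum of the s-shifted prices c_i - i*s (built into a list) and then, in a separate reduction pass, recovers each effective price as that minimum plus i*s and sums price*demand.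
import Mathlib
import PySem

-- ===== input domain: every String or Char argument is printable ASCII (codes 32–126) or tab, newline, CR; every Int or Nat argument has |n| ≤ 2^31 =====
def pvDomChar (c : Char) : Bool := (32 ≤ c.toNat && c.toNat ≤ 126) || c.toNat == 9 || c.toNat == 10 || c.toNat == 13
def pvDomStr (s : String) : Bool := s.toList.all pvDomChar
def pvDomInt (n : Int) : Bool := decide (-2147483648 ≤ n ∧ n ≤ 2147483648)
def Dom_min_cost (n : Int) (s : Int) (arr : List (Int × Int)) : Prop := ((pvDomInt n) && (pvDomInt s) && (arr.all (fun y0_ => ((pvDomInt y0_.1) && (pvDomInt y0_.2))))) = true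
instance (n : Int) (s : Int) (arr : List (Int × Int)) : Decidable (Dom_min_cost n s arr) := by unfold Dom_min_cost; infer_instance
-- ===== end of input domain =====

-- B replaces A's fused min(prev+s, c_i) recurrence by a running minimum of s-shifted prices (c_i - i*s) plus a separate reduction pass; alternative decomposition, same cost.
-- Pre_ excludes exactly the inputs on which A raises IndexError (empty arr, or n exceeding len(arr)).


-- ===== PORT A =====
-- loop body: min_price = min(min_price+s, arr[i][0]); min_cost += min_price*arr[i][1]
def min_cost_step (s : Int) (arr : List (Int × Int)) (st : Int × Int) (i : Int) : Int × Int :=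
  let mp := min (st.2 + s) (PySem.List.pyGetD arr i ((0, 0) : Int × Int)).1
  (st.1 + mp * (PySem.List.pyGetD arr i ((0, 0) : Int × Int)).2, mp)

def min_cost (n : Int) (s : Int) (arr : List (Int × Int)) : Int :=
  let first := PySem.List.pyGetD arr (0 : Int) ((0, 0) : Int × Int)  -- arr[0]; in range under Pre_
  ((PySem.List.pyRange 1 n 1).foldl (min_cost_step s arr) (first.1 * first.2, first.1)).1

-- ===== PORT B =====
-- scan body: mins.append(min(mins[-1], arr[i][0] - i*s))
def min_cost_alt_step (s : Int) (arr : List (Int × Int)) (ms : List Int) (i : Int) : List Int :=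
  ms ++ [min (PySem.List.pyGetD ms (-1) 0) ((PySem.List.pyGetD arr i ((0, 0) : Int × Int)).1 - i * s)]

-- reduction body: total += (m + i*s) * arr[i][1]  for (i, m) in enumerate(mins)
def min_cost_alt_term (s : Int) (arr : List (Int × Int)) (im : Int × Int) : Int :=
  (im.2 + im.1 * s) * (PySem.List.pyGetD arr im.1 ((0, 0) : Int × Int)).2

def min_cost_alt (n : Int) (s : Int) (arr : List (Int × Int)) : Int :=
  let mins := (PySem.List.pyRange 1 n 1).foldl (min_cost_alt_step s arr)
    [(PySem.List.pyGetD arr (0 : Int) ((0, 0) : Int × Int)).1]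
  ((PySem.List.enumerate mins 0).map (min_cost_alt_term s arr)).foldl (· + ·) 0

-- ===== PRECONDITION & SPEC =====
-- Pre_ excludes exactly the inputs where A raises IndexError: empty arr (arr[0]) or n > len(arr) (arr[i] in the loop).
def Pre_min_cost (n : Int) (s : Int) (arr : List (Int × Int)) : Prop :=
  arr ≠ [] ∧ n ≤ (arr.length : Int)
instance (n : Int) (s : Int) (arr : List (Int × Int)) : Decidable (Pre_min_cost n s arr) := by unfold Pre_min_cost; infer_instance

def pvWitness_min_cost : Int × Int × (List (Int × Int)) := (3, 2, [(5, 3), (4, 2), (9, 1)])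

def Spec_min_cost (n : Int) (s : Int) (arr : List (Int × Int)) (out : Int) : Prop := out = min_cost_alt n s arr
instance (n : Int) (s : Int) (arr : List (Int × Int)) (out : Int) : Decidable (Spec_min_cost n s arr out) := by unfold Spec_min_cost; infer_instance

-- ===== CLAIM (what is proved, stated in full; the proofs are below) =====
def Claim_equal_min_cost : Prop := ∀ (n : Int) (s : Int) (arr : List (Int × Int)), Dom_min_cost n s arr → Pre_min_cost n s arr → Spec_min_cost n s arr (min_cost n s arr)

-- ===== LEMMAS AND PROOFS =====

-- Loop invariant after k iterations: B's list has length k+1, its last entry is A's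
-- min_price shifted by -k*s, and B's reduction over it equals A's running total.
theorem min_cost_core (s : Int) (arr : List (Int × Int)) (k : Nat) :
    ((PySem.List.pyRange 1 (1 + (k : Int)) 1).foldl (min_cost_alt_step s arr)
        [(PySem.List.pyGetD arr (0 : Int) ((0, 0) : Int × Int)).1]).length = k + 1 ∧
    PySem.List.pyGetD ((PySem.List.pyRange 1 (1 + (k : Int)) 1).foldl (min_cost_alt_step s arr)
        [(PySem.List.pyGetD arr (0 : Int) ((0, 0) : Int × Int)).1]) (-1) 0 =
      ((PySem.List.pyRange 1 (1 + (k : Int)) 1).foldl (min_cost_step s arr)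
        ((PySem.List.pyGetD arr (0 : Int) ((0, 0) : Int × Int)).1 *
           (PySem.List.pyGetD arr (0 : Int) ((0, 0) : Int × Int)).2,
         (PySem.List.pyGetD arr (0 : Int) ((0, 0) : Int × Int)).1)).2 - (k : Int) * s ∧
    ((PySem.List.enumerate ((PySem.List.pyRange 1 (1 + (k : Int)) 1).foldl (min_cost_alt_step s arr)
        [(PySem.List.pyGetD arr (0 : Int) ((0, 0) : Int × Int)).1]) 0).map (min_cost_alt_term s arr)).foldl (· + ·) 0 =
      ((PySem.List.pyRange 1 (1 + (k : Int)) 1).foldl (min_cost_step s arr)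
        ((PySem.List.pyGetD arr (0 : Int) ((0, 0) : Int × Int)).1 *
           (PySem.List.pyGetD arr (0 : Int) ((0, 0) : Int × Int)).2,
         (PySem.List.pyGetD arr (0 : Int) ((0, 0) : Int × Int)).1)).1 := by
  induction k with
  | zero =>
      refine ⟨by simp [PySem.List.pyRange_one_eq_nil], ?_, ?_⟩ <;>
        simp [PySem.List.pyRange_one_eq_nil, PySem.List.enumerate, min_cost_alt_term,
          PySem.List.pyGetD, PySem.List.pyGet?, PySem.List.pyIdx?]
  | succ k ih =>
      obtain ⟨hlen, hlast, hsum⟩ := ih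
      have hsplit : PySem.List.pyRange 1 (1 + ((k + 1 : Nat) : Int)) 1
          = PySem.List.pyRange 1 (1 + (k : Int)) 1 ++ [1 + (k : Int)] := by
        have h1 := PySem.List.pyRange_one_succ_right (a := 1) (b := 1 + (k : Int)) (by omega)
        have hcast : (1 + ((k + 1 : Nat) : Int)) = (1 + (k : Int)) + 1 := by push_cast; ring
        rw [hcast]; exact h1
      rw [hsplit, List.foldl_append, List.foldl_append]
      simp only [List.foldl_cons, List.foldl_nil]
      set P := (PySem.List.pyRange 1 (1 + (k : Int)) 1).foldl (min_cost_alt_step s arr)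
        [(PySem.List.pyGetD arr (0 : Int) ((0, 0) : Int × Int)).1] with hP
      set A := (PySem.List.pyRange 1 (1 + (k : Int)) 1).foldl (min_cost_step s arr)
        ((PySem.List.pyGetD arr (0 : Int) ((0, 0) : Int × Int)).1 *
           (PySem.List.pyGetD arr (0 : Int) ((0, 0) : Int × Int)).2,
         (PySem.List.pyGetD arr (0 : Int) ((0, 0) : Int × Int)).1) with hA
      have hshift : min (PySem.List.pyGetD P (-1) 0)
            ((PySem.List.pyGetD arr (1 + (k : Int)) ((0, 0) : Int × Int)).1 - (1 + (k : Int)) * s)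
          = min (A.2 + s) (PySem.List.pyGetD arr (1 + (k : Int)) ((0, 0) : Int × Int)).1
              - (1 + (k : Int)) * s := by
        rw [hlast]
        have h2 : A.2 - (k : Int) * s = (A.2 + s) - (1 + (k : Int)) * s := by ring
        rw [h2, ← min_sub_sub_right]
      refine ⟨?_, ?_, ?_⟩
      · simp [min_cost_alt_step, hlen]
      · simp only [min_cost_alt_step, min_cost_step,
          PySem.List.pyGetD_neg_one_append_singleton, hshift]
        push_cast; ring
      · rw [min_cost_alt_step, PySem.List.enumerate_append, List.map_append,
          List.foldl_append, hsum]
        have hidx : (0 : Int) + (P.length : Int) = 1 + (k : Int) := by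
          rw [hlen]; push_cast; ring
        rw [hidx]
        simp only [PySem.List.enumerate, List.map_cons, List.map_nil, List.foldl_cons, List.foldl_nil, min_cost_alt_term, min_cost_step, hshift]
        ring

theorem min_cost_eq_alt (n s : Int) (arr : List (Int × Int)) :
    min_cost n s arr = min_cost_alt n s arr := by
  by_cases h : n ≤ 1
  · simp [min_cost, min_cost_alt, PySem.List.pyRange_one_eq_nil h,
      PySem.List.enumerate, min_cost_alt_term]
  · have hn : n = 1 + ((n - 1).toNat : Int) := by omega
    obtain ⟨_, _, hsum⟩ := min_cost_core s arr (n - 1).toNat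
    rw [min_cost, min_cost_alt, hn]
    exact hsum.symm

-- ===== VERDICT (by name: the statement is the Claim_ definition above) =====
theorem min_cost_spec : Claim_equal_min_cost := by
  intro n s arr _ _
  exact min_cost_eq_alt n s arr
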